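-- pv_equiv track=rewrite | github.com/mandarakn73/prepp | utils.py | get_branch_category
-- ===== SOURCE A (Python) =====
-- def get_branch_category(branch_name):
--     """Categorize branch based on name"""
--     branch_upper = str(branch_name).upper()
--
--     if any(x in branch_upper for x in ['COMPUTER', 'CSE', 'CS']):
--         return 'CSE'
--     elif any(x in branch_upper for x in ['INFORMATION', 'IT']):
--         return 'IT'
--     elif any(x in branch_upper for x in ['ELECTRONICS', 'ECE', 'E&C']):
--         return 'ECE'
--     elif any(x in branch_upper for x in ['ELECTRICAL', 'EEE', 'E&E']):
--         return 'EEE'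
--     elif any(x in branch_upper for x in ['MECHANICAL', 'MECH']):
--         return 'MECH'
--     elif any(x in branch_upper for x in ['CIVIL']):
--         return 'CIVIL'
--     else:
--         return 'OTHER'
-- ===== SOURCE B (Python) =====
-- KEYWORD_TABLE = [
--     ('COMPUTER', 'CSE'), ('CSE', 'CSE'), ('CS', 'CSE'),
--     ('INFORMATION', 'IT'), ('IT', 'IT'),
--     ('ELECTRONICS', 'ECE'), ('ECE', 'ECE'), ('E&C', 'ECE'),
--     ('ELECTRICAL', 'EEE'), ('EEE', 'EEE'), ('E&E', 'EEE'),
--     ('MECHANICAL', 'MECH'), ('MECH', 'MECH'),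
--     ('CIVIL', 'CIVIL'),
-- ]
--
--
-- def get_branch_category(branch_name):
--     """Categorize branch based on name"""
--     branch_upper = str(branch_name).upper()
--     # Scan the flat keyword table back-to-front, overwriting the result on
--     # every hit; the overwrite of the last (= highest-priority) hit wins.
--     result = 'OTHER'
--     for keyword, category in reversed(KEYWORD_TABLE):
--         if keyword in branch_upper:
--             result = category
--     return result
-- ===== Notes on version B (the rewrite author's own statement) =====
-- stated objective: alternative
-- what changed: Replaces the grouped if/elif chain of any()-tests with a flat priority-ordered keyword table scanned back-to-front, overwriting an accumulator on each hit so the highest-priority match wins; no grouping, no short-circuit, no early return.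
import Mathlib
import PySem

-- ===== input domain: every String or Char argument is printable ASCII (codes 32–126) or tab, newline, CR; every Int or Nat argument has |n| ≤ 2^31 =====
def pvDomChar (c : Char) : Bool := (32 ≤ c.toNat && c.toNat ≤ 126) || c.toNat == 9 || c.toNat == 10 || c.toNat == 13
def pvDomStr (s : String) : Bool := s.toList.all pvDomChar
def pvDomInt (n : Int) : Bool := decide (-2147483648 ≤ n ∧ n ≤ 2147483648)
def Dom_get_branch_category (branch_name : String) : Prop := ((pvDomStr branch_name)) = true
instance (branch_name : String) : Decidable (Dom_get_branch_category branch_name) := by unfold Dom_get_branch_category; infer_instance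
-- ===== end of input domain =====

-- B replaces the if/elif chain by a flat keyword table scanned back-to-front with an overwriting accumulator (alternative; same cost).
-- ===== PORT A =====
def get_branch_category (branch_name : String) : String :=
  let branch_upper := PySem.Str.upper branch_name
  if ["COMPUTER", "CSE", "CS"].any (fun x => PySem.Str.isIn x branch_upper) then "CSE"
  else if ["INFORMATION", "IT"].any (fun x => PySem.Str.isIn x branch_upper) then "IT"
  else if ["ELECTRONICS", "ECE", "E&C"].any (fun x => PySem.Str.isIn x branch_upper) then "ECE"
  else if ["ELECTRICAL", "EEE", "E&E"].any (fun x => PySem.Str.isIn x branch_upper) then "EEE"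
  else if ["MECHANICAL", "MECH"].any (fun x => PySem.Str.isIn x branch_upper) then "MECH"
  else if ["CIVIL"].any (fun x => PySem.Str.isIn x branch_upper) then "CIVIL"
  else "OTHER"

-- ===== PORT B =====
def KEYWORD_TABLE : List (String × String) :=
  [("COMPUTER", "CSE"), ("CSE", "CSE"), ("CS", "CSE"),
   ("INFORMATION", "IT"), ("IT", "IT"),
   ("ELECTRONICS", "ECE"), ("ECE", "ECE"), ("E&C", "ECE"),
   ("ELECTRICAL", "EEE"), ("EEE", "EEE"), ("E&E", "EEE"),
   ("MECHANICAL", "MECH"), ("MECH", "MECH"),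
   ("CIVIL", "CIVIL")]

def get_branch_category_alt (branch_name : String) : String :=
  let branch_upper := PySem.Str.upper branch_name
  KEYWORD_TABLE.reverse.foldl
    (fun result p => if PySem.Str.isIn p.1 branch_upper then p.2 else result) "OTHER"

-- ===== PRECONDITION & SPEC =====
def Spec_get_branch_category (branch_name : String) (out : String) : Prop := out = get_branch_category_alt branch_name
instance (branch_name : String) (out : String) : Decidable (Spec_get_branch_category branch_name out) := by unfold Spec_get_branch_category; infer_instance

-- ===== CLAIM (what is proved, stated in full; the proofs are below) =====
def Claim_equal_get_branch_category : Prop := ∀ (branch_name : String), Dom_get_branch_category branch_name → Spec_get_branch_category branch_name (get_branch_category branch_name)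

-- ===== LEMMAS AND PROOFS =====

-- distribute an if over a boolean disjunction
theorem pv_if_or {α : Type} (a b : Bool) (x y : α) :
    (if a || b then x else y) = if a then x else if b then x else y := by
  cases a <;> simp

-- ===== VERDICT (by name: the statement is the Claim_ definition above) =====
theorem get_branch_category_spec : Claim_equal_get_branch_category := by
  intro branch_name _
  unfold Spec_get_branch_category get_branch_category get_branch_category_alt KEYWORD_TABLE
  simp only [List.any_cons, List.any_nil, List.reverse_cons, List.reverse_nil,
    List.nil_append, List.cons_append, List.foldl_cons, List.foldl_nil]
  simp only [Bool.or_false, pv_if_or]
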